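-- pv_equiv track=rewrite | github.com/Oxymoron957/Algorithm_Practice | programmers/woowacourse/4.py | solution
-- ===== SOURCE A (Python) =====
-- def solution(s):
--
--     answer = [1] + [0]*999
--     startIdx = 0
--     for i in range(len(s)):
--         if i != len(s)-1:
--             if s[i] == s[i+1]:
--                 answer[startIdx] += 1
--             else:
--                 startIdx += 1
--                 answer[startIdx] = 1
--     answer = list(filter(lambda x:x!=0, answer))
--     if s[0] == s[-1] and len(set(list(s))) > 1:
--         answer[0]= answer[0] + answer[-1]
--         answer.pop()
--
--     return sorted(answer)
-- ===== SOURCE B (Python) =====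
-- def solution(s):
--     # find a real run boundary, rotate the string there, then one pass of run counting
--     j = next((i for i in range(1, len(s)) if s[i] != s[i - 1]), None)
--     if j is None:
--         return [len(s)]
--     r = s[j:] + s[:j]
--     runs = []
--     c = 1
--     for a, b in zip(r, r[1:]):
--         if a == b:
--             c += 1
--         else:
--             runs.append(c)
--             c = 1
--     runs.append(c)
--     return sorted(runs)
-- ===== Notes on version B (the rewrite author's own statement) =====
-- stated objective: simpler
-- what changed: Instead of filling a preallocated 1000-slot counter array indexed by a run pointer, filtering out the unused zeros and then patching the wraparound by merging the first and last counts, B rotates the string at a run boundary so no run straddles the ends and collects the run lengths in one plain pass; the merge branch, the zero filter and the fixed array disappear (Pre_ excludes the empty string and strings with more than 1000 runs, on both of which A raises IndexError).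
import Mathlib
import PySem

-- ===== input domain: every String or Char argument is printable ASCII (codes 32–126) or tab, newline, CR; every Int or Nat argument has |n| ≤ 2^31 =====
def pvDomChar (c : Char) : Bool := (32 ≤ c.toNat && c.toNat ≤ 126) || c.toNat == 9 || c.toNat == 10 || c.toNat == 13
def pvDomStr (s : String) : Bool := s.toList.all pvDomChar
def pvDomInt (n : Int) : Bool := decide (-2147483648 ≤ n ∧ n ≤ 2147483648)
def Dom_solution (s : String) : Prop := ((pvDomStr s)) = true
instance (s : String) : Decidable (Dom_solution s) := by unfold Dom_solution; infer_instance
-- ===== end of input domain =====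

-- B replaces A's 1000-slot counter array plus wraparound merge by rotating the string at a
-- run boundary and counting runs in one plain pass (objective: simpler; same asymptotics).

-- ===== PORT A =====
-- A-side helpers: the counting loop, then the wraparound-merge step (A's statements in order)
def solutionLoop (cs : List Char) : List Int × Int :=
  -- answer = [1] + [0]*999 ; startIdx = 0 ; for i in range(len(s)): …
  (PySem.List.pyRange 0 (cs.length : Int) 1).foldl
    (fun (st : List Int × Int) i =>
      if i ≠ (cs.length : Int) - 1 then
        if PySem.List.pyGetD cs i ' ' = PySem.List.pyGetD cs (i + 1) ' ' then
          (PySem.List.pySetD st.1 st.2 (PySem.List.pyGetD st.1 st.2 0 + 1), st.2)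
        else
          (PySem.List.pySetD st.1 (st.2 + 1) 1, st.2 + 1)
      else st)
    ((1 : Int) :: List.replicate 999 (0 : Int), (0 : Int))

-- if s[0] == s[-1] and len(set(list(s))) > 1: answer[0] = answer[0] + answer[-1]; answer.pop()
-- (s[0] / s[-1] raise IndexError on the empty string: Pre_ excludes it, pyGetD is exact inside Pre_)
def solutionMerge (cs : List Char) (answer : List Int) : List Int :=
  if PySem.List.pyGetD cs 0 ' ' = PySem.List.pyGetD cs (-1) ' ' ∧
      1 < PySem.Set.len (PySem.Set.ofList cs) then
    (PySem.List.pySetD answer 0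
      (PySem.List.pyGetD answer 0 0 + PySem.List.pyGetD answer (-1) 0)).dropLast
  else answer

def solution (s : String) : List Int :=
  PySem.List.sorted
    (solutionMerge s.toList ((solutionLoop s.toList).1.filter (fun x => x != 0)))
    (fun x => x)

-- ===== PORT B =====
-- next((i for i in range(1, len(s)) if s[i] != s[i-1]), None): scan carrying the previous char
def bScan : List Char → Char → Int → Option Int
  | [], _, _ => none
  | a :: t, prev, i => if a = prev then bScan t a (i + 1) else some i

-- loop body: if a == b: c += 1 else: runs.append(c); c = 1
def bStep (st : List Int × Int) (ab : Char × Char) : List Int × Int :=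
  if ab.1 = ab.2 then (st.1, st.2 + 1) else (st.1 ++ [st.2], 1)

-- runs = [] ; c = 1 ; for a, b in zip(r, r[1:]): … ; runs.append(c)
def bRotRuns (r : List Char) : List Int :=
  let p := (r.zip (PySem.List.slice r (some 1) none)).foldl bStep (([] : List Int), (1 : Int))
  p.1 ++ [p.2]

def solution_alt (s : String) : List Int :=
  match s.toList with
  | [] => [0]                                   -- j is None; [len(s)] = [0]
  | h :: t =>
    match bScan t h 1 with
    | none => [(((h :: t).length : Nat) : Int)] -- j is None; [len(s)]
    | some j =>
      -- r = s[j:] + s[:j]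
      PySem.List.sorted
        (bRotRuns (PySem.List.slice (h :: t) (some j) none ++
                   PySem.List.slice (h :: t) none (some j)))
        (fun x => x)

-- ===== PRECONDITION & SPEC =====
-- Pre_ excludes exactly the inputs on which A raises IndexError: the empty string (s[0])
-- and strings with more than 1000 runs (they overflow A's fixed 1000-slot answer array).
def Pre_solution (s : String) : Prop :=
  s.toList ≠ [] ∧
    (s.toList.zip s.toList.tail).countP (fun p => p.1 != p.2) ≤ 999
instance (s : String) : Decidable (Pre_solution s) := by unfold Pre_solution; infer_instance

def pvWitness_solution : String := "aab"

def Spec_solution (s : String) (out : List Int) : Prop := out = solution_alt s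
instance (s : String) (out : List Int) : Decidable (Spec_solution s out) := by unfold Spec_solution; infer_instance

-- ===== CLAIM (what is proved, stated in full; the proofs are below) =====
def Claim_equal_solution : Prop := ∀ (s : String), Dom_solution s → Pre_solution s → Spec_solution s (solution s)

-- ===== LEMMAS AND PROOFS =====

-- run lengths of prev :: t, with c occurrences of prev already counted
def runsAuxI (prev : Char) (c : Int) : List Char → List Int
  | [] => [c]
  | a :: t => if a = prev then runsAuxI a (c + 1) t else c :: runsAuxI a 1 t

-- the loop body of A, as a function of the character pair (s[i], s[i+1])
def stepA (st : List Int × Int) (ab : Char × Char) : List Int × Int :=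
  if ab.1 = ab.2 then
    (PySem.List.pySetD st.1 st.2 (PySem.List.pyGetD st.1 st.2 0 + 1), st.2)
  else
    (PySem.List.pySetD st.1 (st.2 + 1) 1, st.2 + 1)

theorem getLastI_singleton {α : Type} [Inhabited α] (x : α) : ([x] : List α).getLastI = x := by
  simp [List.getLastI_eq_getLast?]

theorem getLastI_cons_of_ne_nil {α : Type} [Inhabited α] (x : α) (l : List α) (h : l ≠ []) :
    (x :: l).getLastI = l.getLastI := by
  cases l with
  | nil => exact absurd rfl h
  | cons y l => rw [List.getLastI_eq_getLast?, List.getLastI_eq_getLast?, List.getLast?_cons_cons]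

theorem getLastI_append {α : Type} [Inhabited α] (l₁ l₂ : List α) (h : l₂ ≠ []) :
    (l₁ ++ l₂).getLastI = l₂.getLastI := by
  induction l₁ with
  | nil => simp
  | cons a l ih =>
    rw [List.cons_append, getLastI_cons_of_ne_nil a _ (by simp [h]), ih]

theorem getLastI_mem {α : Type} [Inhabited α] (l : List α) (h : l ≠ []) : l.getLastI ∈ l := by
  induction l with
  | nil => exact absurd rfl h
  | cons a l ih =>
    cases l with
    | nil => simp [getLastI_singleton]
    | cons y l' =>
      rw [getLastI_cons_of_ne_nil a _ (List.cons_ne_nil _ _)]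
      exact List.mem_cons_of_mem a (ih (List.cons_ne_nil _ _))

theorem getLastI_eq_getLast {α : Type} [Inhabited α] (l : List α) (h : l ≠ []) :
    l.getLastI = l.getLast h := by
  induction l with
  | nil => exact absurd rfl h
  | cons a l ih =>
    cases l with
    | nil => simp [getLastI_singleton]
    | cons y l' =>
      rw [getLastI_cons_of_ne_nil a _ (List.cons_ne_nil _ _),
        List.getLast_cons (List.cons_ne_nil _ _)]
      exact ih (List.cons_ne_nil _ _)

theorem headI_append {α : Type} [Inhabited α] (l₁ l₂ : List α) (h : l₁ ≠ []) :
    (l₁ ++ l₂).headI = l₁.headI := by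
  cases l₁ with
  | nil => exact absurd rfl h
  | cons a l => simp

theorem pyGetD_zero_headI {α : Type} [Inhabited α] (l : List α) (d : α) (h : l ≠ []) :
    PySem.List.pyGetD l 0 d = l.headI := by
  have hlen : 0 < l.length := List.length_pos_of_ne_nil h
  rw [PySem.List.pyGetD_eq_getElem l d (by omega) (by exact_mod_cast hlen)]
  cases l with
  | nil => exact absurd rfl h
  | cons a l => simp

theorem pyGetD_neg_one_getLastI {α : Type} [Inhabited α] (l : List α) (d : α) (h : l ≠ []) :
    PySem.List.pyGetD l (-1) d = l.getLastI := by
  have hlen : 1 ≤ l.length := List.length_pos_of_ne_nil h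
  have h1 := PySem.List.pyGetD_neg_natCast l 1 d (by omega) hlen
  have h2 : ((-1 : Int)) = -((1 : Nat) : Int) := by norm_num
  rw [h2, h1, getLastI_eq_getLast l h, List.getLast_eq_getElem]

theorem pySetD_zero_cons {α : Type} (l : List α) (x : α) (h : l ≠ []) :
    PySem.List.pySetD l 0 x = x :: l.tail := by
  rw [show (0 : Int) = ((0 : Nat) : Int) from rfl, PySem.List.pySetD_natCast]
  cases l with
  | nil => exact absurd rfl h
  | cons a l => simp

theorem tail_append_of_ne_nil' {α : Type} (l₁ l₂ : List α) (h : l₁ ≠ []) :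
    (l₁ ++ l₂).tail = l₁.tail ++ l₂ := by
  cases l₁ with
  | nil => exact absurd rfl h
  | cons a l => simp

theorem dropLast_append_of_ne_nil' {α : Type} (l₁ l₂ : List α) (h : l₂ ≠ []) :
    (l₁ ++ l₂).dropLast = l₁ ++ l₂.dropLast := by
  rw [List.dropLast_append, if_neg (by simp [h])]

theorem runsAuxI_ne_nil (t : List Char) (prev : Char) (c : Int) : runsAuxI prev c t ≠ [] := by
  induction t generalizing prev c with
  | nil => simp [runsAuxI]
  | cons a t ih =>
    simp only [runsAuxI]
    split
    · exact ih a (c + 1)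
    · simp

theorem runsAuxI_pos (t : List Char) (prev : Char) (c : Int) (hc : 1 ≤ c) :
    ∀ x ∈ runsAuxI prev c t, 1 ≤ x := by
  induction t generalizing prev c with
  | nil => simpa [runsAuxI] using hc
  | cons a t ih =>
    intro x hx
    simp only [runsAuxI] at hx
    split at hx
    · exact ih a (c + 1) (by omega) x hx
    · rcases List.mem_cons.mp hx with h | h
      · omega
      · exact ih a 1 le_rfl x h

theorem runsAuxI_length (t : List Char) (prev : Char) (c : Int) :
    (runsAuxI prev c t).length = ((prev :: t).zip t).countP (fun p => p.1 != p.2) + 1 := by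
  induction t generalizing prev c with
  | nil => simp [runsAuxI]
  | cons a t ih =>
    by_cases h : a = prev
    · subst h
      simp [runsAuxI, List.zip_cons_cons, ih a (c + 1)]
    · simp [runsAuxI, h, List.zip_cons_cons, ih a 1, Ne.symm h]

theorem runsAuxI_add (t : List Char) (prev : Char) (x c : Int) :
    runsAuxI prev (x + c) t = (x + (runsAuxI prev c t).headI) :: (runsAuxI prev c t).tail := by
  induction t generalizing prev x c with
  | nil => simp [runsAuxI]
  | cons a t ih =>
    by_cases h : a = prev
    · subst h
      simp only [runsAuxI]
      have harith : x + c + 1 = x + (c + 1) := by ring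
      rw [harith]
      exact ih a x (c + 1)
    · simp [runsAuxI, h]

theorem runsAuxI_const (t : List Char) (prev : Char) (c : Int) (h : ∀ x ∈ t, x = prev) :
    runsAuxI prev c t = [c + (t.length : Int)] := by
  induction t generalizing prev c with
  | nil => simp [runsAuxI]
  | cons a t ih =>
    have ha : a = prev := h a (List.mem_cons_self ..)
    subst ha
    have hrest : ∀ x ∈ t, x = a := fun x hx => h x (List.mem_cons_of_mem _ hx)
    have hI : runsAuxI a c (a :: t) = runsAuxI a (c + 1) t := by simp [runsAuxI]
    rw [hI, ih a (c + 1) hrest]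
    simp only [List.length_cons]
    congr 1
    push_cast
    ring

theorem runsAuxI_split (t : List Char) (prev : Char) (c : Int) (b : Char) (v : List Char)
    (hb : b ≠ (prev :: t).getLastI) :
    runsAuxI prev c (t ++ b :: v) = runsAuxI prev c t ++ runsAuxI b 1 v := by
  induction t generalizing prev c with
  | nil =>
    have hb' : b ≠ prev := by simpa [getLastI_singleton] using hb
    simp [runsAuxI, hb']
  | cons a t ih =>
    rw [getLastI_cons_of_ne_nil prev (a :: t) (List.cons_ne_nil _ _)] at hb
    by_cases hap : a = prev
    · subst hap
      have hI : runsAuxI a c (a :: (t ++ b :: v)) = runsAuxI a (c + 1) (t ++ b :: v) := by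
        simp [runsAuxI]
      have hI' : runsAuxI a c (a :: t) = runsAuxI a (c + 1) t := by simp [runsAuxI]
      rw [List.cons_append, hI, hI', ih a (c + 1) hb]
    · simp [runsAuxI, hap, ih a 1 hb]

theorem runsAuxI_merge (t : List Char) (prev : Char) (c : Int) (b : Char) (v : List Char)
    (hb : b = (prev :: t).getLastI) :
    runsAuxI prev c (t ++ b :: v) =
      (runsAuxI prev c t).dropLast ++
        (((runsAuxI prev c t).getLastI + (runsAuxI b 1 v).headI) :: (runsAuxI b 1 v).tail) := by
  induction t generalizing prev c with
  | nil =>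
    have hb' : b = prev := by simpa [getLastI_singleton] using hb
    subst hb'
    have hI : runsAuxI b c ([] ++ b :: v) = runsAuxI b (c + 1) v := by simp [runsAuxI]
    rw [hI, runsAuxI_add v b c 1]
    simp [runsAuxI, getLastI_singleton]
  | cons a t ih =>
    rw [getLastI_cons_of_ne_nil prev (a :: t) (List.cons_ne_nil _ _)] at hb
    by_cases hap : a = prev
    · subst hap
      have hI : runsAuxI a c (a :: (t ++ b :: v)) = runsAuxI a (c + 1) (t ++ b :: v) := by
        simp [runsAuxI]
      have hI' : runsAuxI a c (a :: t) = runsAuxI a (c + 1) t := by simp [runsAuxI]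
      rw [List.cons_append, hI, hI']
      exact ih a (c + 1) hb
    · simp only [List.cons_append, runsAuxI, if_neg hap]
      rw [ih a 1 hb]
      have hne := runsAuxI_ne_nil t a 1
      rw [List.dropLast_cons_of_ne_nil hne, getLastI_cons_of_ne_nil c _ hne]
      simp

theorem loopB (t : List Char) (prev : Char) (acc : List Int) (c : Int) :
    (((prev :: t).zip t).foldl bStep (acc, c)).1 ++ [(((prev :: t).zip t).foldl bStep (acc, c)).2]
      = acc ++ runsAuxI prev c t := by
  induction t generalizing prev acc c with
  | nil => simp [runsAuxI]
  | cons b t ih =>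
    rw [List.zip_cons_cons, List.foldl_cons]
    by_cases hpb : prev = b
    · have hstep : bStep (acc, c) (prev, b) = (acc, c + 1) := by simp [bStep, hpb]
      rw [hstep]
      have hR : runsAuxI prev c (b :: t) = runsAuxI b (c + 1) t := by simp [runsAuxI, hpb]
      rw [hR]
      exact ih b acc (c + 1)
    · have hstep : bStep (acc, c) (prev, b) = (acc ++ [c], 1) := by simp [bStep, hpb]
      rw [hstep]
      have hbp : ¬ b = prev := fun h => hpb h.symm
      have hR : runsAuxI prev c (b :: t) = c :: runsAuxI b 1 t := by simp [runsAuxI, hbp]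
      rw [hR, ih b (acc ++ [c]) 1]
      simp

theorem loopA (t : List Char) (prev : Char) (fin : List Int) (c : Int) (z : Nat)
    (hz : (runsAuxI prev c t).length ≤ z + 1) :
    ((prev :: t).zip t).foldl stepA (fin ++ c :: List.replicate z 0, (fin.length : Int))
      = (fin ++ runsAuxI prev c t ++ List.replicate (z + 1 - (runsAuxI prev c t).length) 0,
         (fin.length : Int) + ((runsAuxI prev c t).length : Int) - 1) := by
  induction t generalizing prev fin c z with
  | nil => simp [runsAuxI]
  | cons b t ih =>
    rw [List.zip_cons_cons, List.foldl_cons]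
    by_cases hpb : prev = b
    · have hstep : stepA (fin ++ c :: List.replicate z 0, (fin.length : Int)) (prev, b)
          = (fin ++ (c + 1) :: List.replicate z 0, (fin.length : Int)) := by
        simp [stepA, hpb, List.getD]
      have hR : runsAuxI prev c (b :: t) = runsAuxI b (c + 1) t := by simp [runsAuxI, hpb]
      rw [hR] at hz
      rw [hstep, hR]
      exact ih b fin (c + 1) z hz
    · have hbp : ¬ b = prev := fun hh => hpb hh.symm
      have hR : runsAuxI prev c (b :: t) = c :: runsAuxI b 1 t := by simp [runsAuxI, hbp]
      rw [hR] at hz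
      simp only [List.length_cons] at hz
      have hlen : 1 ≤ (runsAuxI b 1 t).length :=
        List.length_pos_of_ne_nil (runsAuxI_ne_nil t b 1)
      obtain ⟨z', rfl⟩ : ∃ z', z = z' + 1 := ⟨z - 1, by omega⟩
      have hcast : (fin.length : Int) + 1 = ((fin.length + 1 : Nat) : Int) := by push_cast; ring
      have hset : PySem.List.pySetD (fin ++ c :: List.replicate (z' + 1) 0) ((fin.length : Int) + 1) 1
          = (fin ++ [c]) ++ (1 : Int) :: List.replicate z' 0 := by
        rw [hcast, PySem.List.pySetD_natCast, List.replicate_succ]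
        rw [List.set_append, if_neg (by omega)]
        have hidx : fin.length + 1 - fin.length = 1 := by omega
        rw [hidx]
        simp
      have hstep : stepA (fin ++ c :: List.replicate (z' + 1) 0, (fin.length : Int)) (prev, b)
          = ((fin ++ [c]) ++ (1 : Int) :: List.replicate z' 0, (fin.length : Int) + 1) := by
        simp [stepA, hpb, hset]
      rw [hstep,
        show ((fin.length : Int) + 1) = (((fin ++ [c]).length : Nat) : Int) from by
          simp [List.length_append],
        hR, ih b (fin ++ [c]) 1 z' (by omega)]
      simp only [Prod.mk.injEq]
      constructor
      · simp only [List.length_cons]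
        have hrep : z' + 1 + 1 - ((runsAuxI b 1 t).length + 1) = z' + 1 - (runsAuxI b 1 t).length := by
          omega
        rw [hrep]
        simp [List.append_assoc]
      · simp only [List.length_append, List.length_cons, List.length_nil]
        push_cast
        ring

theorem bScan_none (t : List Char) (prev : Char) (i : Int) (h : bScan t prev i = none) :
    ∀ x ∈ t, x = prev := by
  induction t generalizing prev i with
  | nil => simp
  | cons a t ih =>
    simp only [bScan] at h
    by_cases hap : a = prev
    · rw [if_pos hap] at h
      intro x hx
      rcases List.mem_cons.mp hx with h' | h'
      · exact h' ▸ hap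
      · exact (ih a (i + 1) h x h').trans hap
    · rw [if_neg hap] at h
      exact absurd h (by simp)

theorem bScan_some (t : List Char) (prev : Char) (i j : Int) (h : bScan t prev i = some j) :
    ∃ (u : List Char) (b : Char) (v : List Char),
      t = u ++ b :: v ∧ j = i + (u.length : Int) ∧ b ≠ (prev :: u).getLastI := by
  induction t generalizing prev i with
  | nil => simp [bScan] at h
  | cons a t ih =>
    simp only [bScan] at h
    by_cases hap : a = prev
    · rw [if_pos hap] at h
      obtain ⟨u, b, v, hsplit, hj, hb⟩ := ih a (i + 1) h
      refine ⟨a :: u, b, v, by simp [hsplit], ?_, ?_⟩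
      · simp only [List.length_cons]
        push_cast
        omega
      · rw [getLastI_cons_of_ne_nil prev (a :: u) (List.cons_ne_nil _ _)]
        exact hb
    · rw [if_neg hap] at h
      injection h with h'
      subst h'
      refine ⟨[], a, t, rfl, by simp, ?_⟩
      simpa [getLastI_singleton] using hap

theorem two_mem_length {α : Type} (L : List α) (a b : α) (ha : a ∈ L) (hb : b ∈ L)
    (hne : a ≠ b) : 2 ≤ L.length := by
  rcases L with _ | ⟨x, _ | ⟨y, L⟩⟩
  · simp at ha
  · simp at ha hb
    exact absurd (ha.trans hb.symm) hne
  · simp only [List.length_cons]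
    omega

theorem set_len_two (cs : List Char) (a b : Char) (ha : a ∈ cs) (hb : b ∈ cs) (hne : a ≠ b) :
    1 < PySem.Set.len (PySem.Set.ofList cs) := by
  have h2 : 2 ≤ (PySem.Set.ofList cs).length :=
    two_mem_length _ a b ((PySem.Set.mem_ofList cs a).mpr ha)
      ((PySem.Set.mem_ofList cs b).mpr hb) hne
  simp only [PySem.Set.len]
  omega

theorem set_foldl_add_const (t : List Char) (h : Char) (hall : ∀ x ∈ t, x = h) :
    t.foldl PySem.Set.add [h] = [h] := by
  induction t with
  | nil => rfl
  | cons a t ih =>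
    have ha : a = h := hall a (List.mem_cons_self ..)
    subst ha
    rw [List.foldl_cons]
    have hadd : PySem.Set.add [a] a = [a] := by simp [PySem.Set.add, PySem.Set.contains]
    rw [hadd]
    exact ih (fun x hx => hall x (List.mem_cons_of_mem _ hx))

theorem set_ofList_const (t : List Char) (h : Char) (hall : ∀ x ∈ t, x = h) :
    PySem.Set.ofList (h :: t) = [h] := by
  rw [PySem.Set.ofList_eq_foldl, List.foldl_cons]
  have hadd : PySem.Set.add [] h = [h] := by simp [PySem.Set.add, PySem.Set.contains]
  rw [hadd]
  exact set_foldl_add_const t h hall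

theorem filter_pos_append_replicate (R : List Int) (k : Nat) (hpos : ∀ x ∈ R, 1 ≤ x) :
    (R ++ List.replicate k 0).filter (fun x => x != 0) = R := by
  rw [List.filter_append]
  have h1 : R.filter (fun x => x != 0) = R :=
    List.filter_eq_self.mpr (fun x hx => by
      have := hpos x hx
      simp only [bne_iff_ne, ne_eq]
      omega)
  have h2 : (List.replicate k (0 : Int)).filter (fun x => x != 0) = [] := by simp
  rw [h1, h2, List.append_nil]

theorem loopA_fst (h : Char) (t : List Char)
    (hcount : ((h :: t).zip t).countP (fun p => p.1 != p.2) ≤ 999) :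
    (solutionLoop (h :: t)).1
      = runsAuxI h 1 t ++ List.replicate (1000 - (runsAuxI h 1 t).length) 0 := by
  have hz : (runsAuxI h 1 t).length ≤ 999 + 1 := by rw [runsAuxI_length]; omega
  unfold solutionLoop
  have hn : (((h :: t).length : Nat) : Int) = (t.length : Int) + 1 := by
    simp only [List.length_cons]
    push_cast
    ring
  simp only [hn]
  rw [PySem.List.pyRange_one_succ_right (by positivity)]
  rw [List.foldl_append, List.foldl_cons, List.foldl_nil]
  rw [if_neg (by omega : ¬ ((t.length : Int) ≠ (t.length : Int) + 1 - 1))]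
  have hzl : ((h :: t).zip t).length = t.length := by simp
  have hcongr := PySem.List.foldl_congr_mem (PySem.List.pyRange 0 ((t.length : Int)) 1)
    (fun (st : List Int × Int) (i : Int) =>
      if i ≠ (t.length : Int) + 1 - 1 then
        if PySem.List.pyGetD (h :: t) i ' ' = PySem.List.pyGetD (h :: t) (i + 1) ' ' then
          (PySem.List.pySetD st.1 st.2 (PySem.List.pyGetD st.1 st.2 0 + 1), st.2)
        else (PySem.List.pySetD st.1 (st.2 + 1) 1, st.2 + 1)
      else st)
    (fun (st : List Int × Int) (i : Int) =>
      stepA st (PySem.List.pyGetD ((h :: t).zip t) i (' ', ' ')))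
    ((1 : Int) :: List.replicate 999 (0 : Int), (0 : Int))
    (by
      intro acc i hi
      obtain ⟨h0i, h1i⟩ := PySem.List.mem_pyRange_one.mp hi
      have hiN : i.toNat < t.length := by omega
      have ht1 : (i + 1).toNat = i.toNat + 1 := by omega
      beta_reduce
      rw [if_pos (by omega : i ≠ (t.length : Int) + 1 - 1)]
      rw [PySem.List.pyGetD_eq_getElem (h :: t) (i := i) ' ' h0i
            (by simp only [List.length_cons]; push_cast; omega),
          PySem.List.pyGetD_eq_getElem (h :: t) (i := i + 1) ' ' (by omega)
            (by simp only [List.length_cons]; push_cast; omega),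
          PySem.List.pyGetD_eq_getElem ((h :: t).zip t) (i := i) (' ', ' ') h0i
            (by rw [hzl]; omega)]
      simp [stepA, List.getElem_zip, ht1])
  rw [hcongr]
  rw [show (t.length : Int) = ((((h :: t).zip t).length : Nat) : Int) from by rw [hzl]]
  rw [PySem.List.foldl_pyRange_pyGetD' ((h :: t).zip t) (' ', ' ') stepA _ (le_refl 0)]
  simp only [Int.toNat_zero, List.drop_zero]
  have hmain := loopA t h [] 1 999 hz
  simp only [List.nil_append, List.length_nil, Nat.cast_zero] at hmain
  rw [show (999 + 1 : Nat) = 1000 from by norm_num] at hmain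
  rw [hmain]

-- ===== VERDICT (by name: the statement is the Claim_ definition above) =====
theorem solution_spec : Claim_equal_solution := by
  unfold Claim_equal_solution
  intro s _hdom hpre
  unfold Spec_solution
  obtain ⟨hne, hcount⟩ := hpre
  cases hcs : s.toList with
  | nil => exact absurd hcs hne
  | cons h t =>
    rw [hcs] at hcount
    simp only [List.tail_cons] at hcount
    have hApre : solution s
        = PySem.List.sorted (solutionMerge (h :: t) (runsAuxI h 1 t)) (fun x => x) := by
      unfold solution
      rw [hcs, loopA_fst h t hcount,
        filter_pos_append_replicate _ _ (runsAuxI_pos t h 1 le_rfl)]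
    rcases hscan : bScan t h 1 with _ | j
    · -- no run boundary: every character equals h
      have hall := bScan_none t h 1 hscan
      have hB : solution_alt s = [(((h :: t).length : Nat) : Int)] := by
        unfold solution_alt
        rw [hcs]
        simp [hscan]
      have hR : runsAuxI h 1 t = [1 + (t.length : Int)] := runsAuxI_const t h 1 hall
      have hmerge : solutionMerge (h :: t) (runsAuxI h 1 t) = runsAuxI h 1 t := by
        unfold solutionMerge
        rw [if_neg]
        rintro ⟨-, hlt⟩
        rw [set_ofList_const t h hall] at hlt
        simp [PySem.Set.len] at hlt
      rw [hApre, hmerge, hR, hB,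
        PySem.List.sorted_eq_self_of_pairwise _ _ (List.pairwise_singleton _ _)]
      exact congrArg (fun z => [z]) (by simp only [List.length_cons]; push_cast; ring)
    · -- a boundary exists: rotate vs merge
      obtain ⟨u, b, v, htuv, hj, hbne⟩ := bScan_some t h 1 j hscan
      subst htuv
      have hU : runsAuxI h 1 u ≠ [] := runsAuxI_ne_nil u h 1
      have hV : runsAuxI b 1 v ≠ [] := runsAuxI_ne_nil v b 1
      have hRsplit : runsAuxI h 1 (u ++ b :: v) = runsAuxI h 1 u ++ runsAuxI b 1 v :=
        runsAuxI_split u h 1 b v hbne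
      have hB : solution_alt s
          = PySem.List.sorted (runsAuxI b 1 (v ++ h :: u)) (fun x => x) := by
        unfold solution_alt
        rw [hcs]
        simp only [hscan]
        have hj' : j = ((u.length + 1 : Nat) : Int) := by push_cast; omega
        rw [hj', PySem.List.slice_from _ (by positivity), PySem.List.slice_to _ (by positivity)]
        simp only [Int.toNat_natCast]
        rw [List.drop_succ_cons, List.drop_left, List.take_succ_cons, List.take_left]
        refine congrArg (fun l => PySem.List.sorted l (fun x => x)) ?_
        unfold bRotRuns
        rw [PySem.List.slice_from_one]
        simp only [List.cons_append, List.tail_cons]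
        have := loopB (v ++ h :: u) b [] 1
        simpa using this
      have hlast : PySem.List.pyGetD (h :: (u ++ b :: v)) (-1) ' ' = (b :: v).getLastI := by
        rw [pyGetD_neg_one_getLastI _ _ (List.cons_ne_nil _ _),
          getLastI_cons_of_ne_nil h _ (by simp), getLastI_append u (b :: v) (by simp)]
      have hhead : PySem.List.pyGetD (h :: (u ++ b :: v)) 0 ' ' = h := by
        rw [pyGetD_zero_headI _ _ (List.cons_ne_nil _ _)]
        simp
      by_cases hhl : h = (b :: v).getLastI
      · -- wraparound merge happens in A; B's rotation glues the same two runs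
        have hmem1 : (h :: u).getLastI ∈ h :: (u ++ b :: v) := by
          have := getLastI_mem (h :: u) (List.cons_ne_nil _ _)
          rcases List.mem_cons.mp this with h' | h'
          · simp [h']
          · exact List.mem_cons_of_mem _ (List.mem_append_left _ h')
        have hmem2 : b ∈ h :: (u ++ b :: v) :=
          List.mem_cons_of_mem _ (List.mem_append_right _ (List.mem_cons_self ..))
        have hset : 1 < PySem.Set.len (PySem.Set.ofList (h :: (u ++ b :: v))) :=
          set_len_two _ _ _ hmem1 hmem2 (Ne.symm hbne)
        have hRmerge : runsAuxI b 1 (v ++ h :: u)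
            = (runsAuxI b 1 v).dropLast ++
                (((runsAuxI b 1 v).getLastI + (runsAuxI h 1 u).headI) :: (runsAuxI h 1 u).tail) :=
          runsAuxI_merge v b 1 h u hhl
        have hmerge : solutionMerge (h :: (u ++ b :: v)) (runsAuxI h 1 (u ++ b :: v))
            = ((runsAuxI h 1 u).headI + (runsAuxI b 1 v).getLastI)
                :: ((runsAuxI h 1 u).tail ++ (runsAuxI b 1 v).dropLast) := by
          unfold solutionMerge
          rw [if_pos ⟨by rw [hhead, hlast]; exact hhl, hset⟩]
          rw [hRsplit]
          rw [pyGetD_zero_headI _ _ (by simp [hU]), pyGetD_neg_one_getLastI _ _ (by simp [hU]),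
            headI_append _ _ hU, getLastI_append _ _ hV,
            pySetD_zero_cons _ _ (by simp [hU]),
            tail_append_of_ne_nil' _ _ hU,
            List.dropLast_cons_of_ne_nil (by simp [hV]),
            dropLast_append_of_ne_nil' _ _ hV]
        rw [hApre, hmerge, hB, hRmerge]
        rw [PySem.List.sorted_id_eq_sorted_id_iff_perm]
        rw [add_comm ((runsAuxI b 1 v).getLastI) ((runsAuxI h 1 u).headI)]
        exact ((List.perm_append_comm).cons _).trans List.perm_middle.symm
      · have hmerge : solutionMerge (h :: (u ++ b :: v)) (runsAuxI h 1 (u ++ b :: v))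
            = runsAuxI h 1 (u ++ b :: v) := by
          unfold solutionMerge
          rw [if_neg]
          rintro ⟨hEq, -⟩
          rw [hhead, hlast] at hEq
          exact hhl hEq
        have hRsplit2 : runsAuxI b 1 (v ++ h :: u) = runsAuxI b 1 v ++ runsAuxI h 1 u :=
          runsAuxI_split v b 1 h u hhl
        rw [hApre, hmerge, hB, hRsplit, hRsplit2]
        rw [PySem.List.sorted_id_eq_sorted_id_iff_perm]
        exact List.perm_append_comm
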